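-- pv_equiv track=rewrite | github.com/jj11hh/schoolwork-utils | Mendelian_inheritance_demo/genes.py | make_p
-- ===== SOURCE A (Python) =====
-- def make_p(pure):
--     pure=pure.upper()
--     result=[]
--     if pure=="":return result
--     if len(pure)==1:return [pure[0],pure[0].lower()]
--     for c in pure[0],pure[0].lower():
--         result.extend([c+i for i in make_p(pure[1:])])
--     return result
-- ===== SOURCE B (Python) =====
-- def make_p(pure):
--     if not pure:
--         return []
--     result = [""]
--     for ch in pure.upper():
--         low = ch.lower()
--         result = [r + c for r in result for c in (ch, low)]
--     return result
-- ===== Notes on version B (the rewrite author's own statement) =====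
-- stated objective: faster
-- what changed: Replaced A's branching recursion (which recomputes the suffix combinations make_p(pure[1:]) once per case branch and rebuilds every suffix string at each level) with a single left-to-right fold that extends the running list of prefixes by both cases of each character, computing each level exactly once; intended as faster (O(n*2^n) vs O(n^2*2^n)), measured 5.79x at n=16, the largest size both finished (the 2^n-sized output makes both time out beyond that).
import Mathlib
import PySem

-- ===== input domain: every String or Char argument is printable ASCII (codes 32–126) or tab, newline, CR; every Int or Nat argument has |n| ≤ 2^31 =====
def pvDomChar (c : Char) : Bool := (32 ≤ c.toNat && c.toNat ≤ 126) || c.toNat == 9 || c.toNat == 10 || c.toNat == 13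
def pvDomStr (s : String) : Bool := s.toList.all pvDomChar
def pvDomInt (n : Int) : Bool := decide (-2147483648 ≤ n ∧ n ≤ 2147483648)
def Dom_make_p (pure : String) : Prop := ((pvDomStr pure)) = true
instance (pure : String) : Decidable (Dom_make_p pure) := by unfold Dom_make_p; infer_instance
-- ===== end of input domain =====

-- B replaces A's recursion (recomputes the suffix per branch) by one left-to-right fold over the characters;
-- intended as faster, measured 5.79x at n=16, the largest size both Pythons finished.

-- ===== PORT A =====
-- A's recursion, on the code points of the string; results are kept as List Char
-- and packed into String at the wrapper (String.append is opaque to the kernel).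
def make_pA (s : List Char) : List (List Char) :=
    let p := PySem.Chars.upper s          -- pure = pure.upper()
    if hp : p = [] then []                -- if pure == "": return []
    else if p.length = 1 then             -- if len(pure) == 1: return [pure[0], pure[0].lower()]
      [[p.head hp], [PySem.Chars.lowerChar (p.head hp)]]
    else                                  -- for c in pure[0], pure[0].lower(): result.extend([c+i for i in make_p(pure[1:])])
      [p.head hp, PySem.Chars.lowerChar (p.head hp)].foldl
        (fun result c => result ++ (make_pA p.tail).map (fun i => c :: i)) []
  termination_by s.length
  decreasing_by
    have h1 : (PySem.Chars.upper s).length = s.length := by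
      simp [PySem.Chars.upper]
    have h2 : 0 < (PySem.Chars.upper s).length := List.length_pos_iff.mpr hp
    simp only [List.length_tail]
    omega

def make_p (pure : String) : List String :=
  (make_pA pure.toList).map String.ofList

-- ===== PORT B =====
-- one loop step: result = [r + c for r in result for c in (ch, ch.lower())]
def make_pB_step (result : List (List Char)) (ch : Char) : List (List Char) :=
  result.flatMap (fun r => [r ++ [ch], r ++ [PySem.Chars.lowerChar ch]])

def make_p_alt (pure : String) : List String :=
  if pure.toList = [] then []
  else (((PySem.Chars.upper pure.toList).foldl make_pB_step [[]]).map String.ofList)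

-- ===== PRECONDITION & SPEC =====
def Spec_make_p (pure : String) (out : List String) : Prop := out = make_p_alt pure
instance (pure : String) (out : List String) : Decidable (Spec_make_p pure out) := by unfold Spec_make_p; infer_instance

-- ===== CLAIM (what is proved, stated in full; the proofs are below) =====
def Claim_equal_make_p : Prop := ∀ (pure : String), Dom_make_p pure → Spec_make_p pure (make_p pure)

-- ===== LEMMAS AND PROOFS =====

theorem upperChar_idem (c : Char) :
    PySem.Chars.upperChar (PySem.Chars.upperChar c) = PySem.Chars.upperChar c := by
  unfold PySem.Chars.upperChar PySem.Chars.islower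
  split_ifs with h1 h2 <;> try rfl
  exfalso
  simp only [Bool.and_eq_true, decide_eq_true_eq, Char.le_def, UInt32.le_iff_toNat_le] at h1 h2
  have ha : ('a'.val.toNat) = 97 := by decide
  have hz : ('z'.val.toNat) = 122 := by decide
  have hv : Nat.isValidChar (c.toNat - 32) := Or.inl (by
    have hc : c.val.toNat = c.toNat := rfl
    omega)
  have h2' : (Char.ofNat (c.toNat - 32)).val.toNat = (Char.ofNat (c.toNat - 32)).toNat := rfl
  rw [h2', Char.toNat_ofNat] at h2
  simp only [hv, if_true] at h2
  have hc : c.val.toNat = c.toNat := rfl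
  omega

theorem upper_idem (s : List Char) :
    PySem.Chars.upper (PySem.Chars.upper s) = PySem.Chars.upper s := by
  simp [PySem.Chars.upper, upperChar_idem]

theorem step_append (as bs : List (List Char)) (c : Char) :
    make_pB_step (as ++ bs) c = make_pB_step as c ++ make_pB_step bs c := by
  simp [make_pB_step]

theorem foldl_step_append (l : List Char) (as bs : List (List Char)) :
    l.foldl make_pB_step (as ++ bs) = l.foldl make_pB_step as ++ l.foldl make_pB_step bs := by
  induction l generalizing as bs with
  | nil => rfl
  | cons c t ih => simp [List.foldl_cons, step_append, ih]

theorem step_cons_map (rs : List (List Char)) (x c : Char) :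
    make_pB_step (rs.map (fun r => x :: r)) c = (make_pB_step rs c).map (fun r => x :: r) := by
  simp [make_pB_step, List.flatMap_map, List.map_flatMap]

theorem foldl_step_cons_map (l : List Char) (rs : List (List Char)) (x : Char) :
    l.foldl make_pB_step (rs.map (fun r => x :: r)) = (l.foldl make_pB_step rs).map (fun r => x :: r) := by
  induction l generalizing rs with
  | nil => rfl
  | cons c t ih => simp [List.foldl_cons, step_cons_map, ih]

theorem make_pA_eq_foldl (s : List Char) :
    make_pA s = if s = [] then [] else (PySem.Chars.upper s).foldl make_pB_step [[]] := by
  induction hn : s.length using Nat.strong_induction_on generalizing s with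
  | _ n ih =>
  match s with
  | [] => rw [make_pA.eq_def]; simp [PySem.Chars.upper]
  | [c] =>
    rw [make_pA.eq_def]
    simp [PySem.Chars.upper, make_pB_step]
  | c :: d :: t =>
    rw [make_pA.eq_def]
    have hup : PySem.Chars.upper (c :: d :: t)
        = PySem.Chars.upperChar c :: PySem.Chars.upper (d :: t) := by
      simp [PySem.Chars.upper]
    have hne : PySem.Chars.upper (c :: d :: t) ≠ [] := by simp [hup]
    have hlen : (PySem.Chars.upper (c :: d :: t)).length ≠ 1 := by
      simp [PySem.Chars.upper]
    -- recursive value via IH on the (shorter) tail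
    have hrec : make_pA (PySem.Chars.upper (c :: d :: t)).tail
        = (PySem.Chars.upper (d :: t)).foldl make_pB_step [[]] := by
      have h1 : (PySem.Chars.upper (c :: d :: t)).tail = PySem.Chars.upper (d :: t) := by
        simp [hup]
      rw [h1]
      have hlt : (PySem.Chars.upper (d :: t)).length < n := by
        simp [PySem.Chars.upper] at *
        omega
      rw [ih _ hlt _ rfl, if_neg (by simp [PySem.Chars.upper]), upper_idem]
    simp only [dif_neg hne, if_neg hlen, List.foldl_cons, List.foldl_nil]
    rw [hrec]
    have hhead : (PySem.Chars.upper (c :: d :: t)).head hne = PySem.Chars.upperChar c := by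
      simp [hup]
    rw [hhead, hup]
    set u := PySem.Chars.upperChar c
    set M := PySem.Chars.upper (d :: t)
    have hstep : make_pB_step [[]] u = [[u], [PySem.Chars.lowerChar u]] := by
      simp [make_pB_step]
    rw [List.foldl_cons, hstep]
    have hsplit : ([[u], [PySem.Chars.lowerChar u]] : List (List Char)) = [[u]] ++ [[PySem.Chars.lowerChar u]] := rfl
    rw [hsplit, foldl_step_append]
    have h1 : ([[u]] : List (List Char)) = ([[]] : List (List Char)).map (fun r => u :: r) := rfl
    have h2 : ([[PySem.Chars.lowerChar u]] : List (List Char))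
        = ([[]] : List (List Char)).map (fun r => PySem.Chars.lowerChar u :: r) := rfl
    rw [h1, h2, foldl_step_cons_map, foldl_step_cons_map]
    simp

-- ===== VERDICT (by name: the statement is the Claim_ definition above) =====
theorem make_p_spec : Claim_equal_make_p := by
  intro pure _
  unfold Spec_make_p make_p make_p_alt
  rw [make_pA_eq_foldl]
  by_cases h : pure.toList = [] <;> simp [h]
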